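-- pv_equiv track=rewrite | github.com/Vijay040926/DSA_Python | Section 9/Excercise_13.py | generate_hollow_right_angled_triangle
-- ===== SOURCE A (Python) =====
-- def generate_hollow_right_angled_triangle(n):
--     lst = []
--     for i in range(1, n + 1):
--         if i == 1:
--             lst.append('*')
--         elif i < n:
--             lst.append('*' + ' ' * (i - 2) + '*')
--         else:
--             lst.append('*' * i)
--
--     return lst
-- ===== SOURCE B (Python) =====
-- def generate_hollow_right_angled_triangle(n):
--     rows = []
--     for i in range(1, n + 1):
--         last = i - 1
--         rows.append(''.join(
--             '*' if j == 0 or j == last or i == n else ' '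
--             for j in range(i)))
--     return rows
-- ===== Notes on version B (the rewrite author's own statement) =====
-- stated objective: alternative
-- what changed: Each row is built character by character from a positional predicate (first column, diagonal, or last row gives '*', else ' ') instead of assembling named segments via three row-type branches.
import Mathlib
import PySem

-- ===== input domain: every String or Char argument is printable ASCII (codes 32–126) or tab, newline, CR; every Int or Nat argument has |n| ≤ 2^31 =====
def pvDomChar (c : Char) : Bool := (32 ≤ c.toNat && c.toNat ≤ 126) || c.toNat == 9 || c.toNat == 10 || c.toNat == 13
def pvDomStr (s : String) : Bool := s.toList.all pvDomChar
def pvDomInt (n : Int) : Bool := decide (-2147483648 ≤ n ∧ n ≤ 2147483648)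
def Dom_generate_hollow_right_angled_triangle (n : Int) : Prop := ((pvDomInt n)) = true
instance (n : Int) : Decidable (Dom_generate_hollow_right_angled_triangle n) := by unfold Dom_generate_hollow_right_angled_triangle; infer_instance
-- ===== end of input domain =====

-- B builds each row character by character from a positional predicate (first column / diagonal / last row)
-- instead of A's three named row-type branches; objective: alternative decomposition, same cost.

-- ===== PORT A =====
-- Python string repetition 'c' * k is ported by hand as List.replicate k.toNat c; exact, since
-- Python returns '' for a non-positive count and .toNat clamps negatives to 0.
def generate_hollow_right_angled_triangle (n : Int) : List String :=
  (PySem.List.pyRange 1 (n + 1)).foldl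
    (fun lst i =>
      if i == 1 then lst ++ [String.ofList ['*']]
      else if i < n then lst ++ [String.ofList ('*' :: List.replicate (i - 2).toNat ' ' ++ ['*'])]
      else lst ++ [String.ofList (List.replicate i.toNat '*')]) []

-- ===== PORT B =====
-- inner loop of Source B: collect one Char per j in range(i), then ''.join via String.ofList
def pvRowB (n i : Int) : String :=
  String.ofList ((PySem.List.pyRange 0 i).foldl
    (fun row j => row ++ [if j == 0 || j == i - 1 || i == n then '*' else ' ']) [])

def generate_hollow_right_angled_triangle_alt (n : Int) : List String :=
  (PySem.List.pyRange 1 (n + 1)).foldl (fun rows i => rows ++ [pvRowB n i]) []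

-- ===== PRECONDITION & SPEC =====
def Spec_generate_hollow_right_angled_triangle (n : Int) (out : List String) : Prop := out = generate_hollow_right_angled_triangle_alt n
instance (n : Int) (out : List String) : Decidable (Spec_generate_hollow_right_angled_triangle n out) := by unfold Spec_generate_hollow_right_angled_triangle; infer_instance

-- ===== CLAIM (what is proved, stated in full; the proofs are below) =====
def Claim_equal_generate_hollow_right_angled_triangle : Prop := ∀ (n : Int), Dom_generate_hollow_right_angled_triangle n → Spec_generate_hollow_right_angled_triangle n (generate_hollow_right_angled_triangle n)

-- ===== LEMMAS AND PROOFS =====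

-- B's row as a map over range(i)
theorem pvRowB_eq_map (n i : Int) :
    pvRowB n i = String.ofList ((PySem.List.pyRange 0 i).map
      (fun j => if j == 0 || j == i - 1 || i == n then '*' else ' ')) := by
  unfold pvRowB
  rw [PySem.List.foldl_append_singleton_eq_map, List.nil_append]

-- index m of A's hollow middle row: star at the two ends, space between
theorem rhs_char (k m : Nat) (hk : 2 ≤ k) (hm : m < k) :
    ('*' :: List.replicate (k - 2) ' ' ++ ['*'])[m]'(by simp; omega)
      = if m = 0 ∨ m = k - 1 then '*' else ' ' := by
  rcases Nat.lt_or_ge m (k - 1) with h | h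
  · rw [List.getElem_append_left (by simp; omega)]
    rcases eq_or_ne m 0 with h0 | h0
    · subst h0; simp
    · obtain ⟨m', rfl⟩ : ∃ m', m = m' + 1 := ⟨m - 1, by omega⟩
      rw [List.getElem_cons_succ]
      simp [List.getElem_replicate]
      omega
  · have hme : m = k - 1 := by omega
    subst hme
    rw [List.getElem_append_right (by simp; omega)]
    simp

-- middle rows: the positional predicate produces star, spaces, star
theorem mid_row_chars (k : Nat) (hk : 2 ≤ k) (n : Int) (hn : (k : Int) ≠ n) :
    (List.range k).map (fun (j : Nat) => if (j : Int) == 0 || (j : Int) == (k : Int) - 1 || (k : Int) == n then '*' else ' ')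
      = '*' :: List.replicate (k - 2) ' ' ++ ['*'] := by
  apply List.ext_getElem
  · simp; omega
  · intro m h1 h2
    have hm : m < k := by simpa using h1
    simp only [List.getElem_map, List.getElem_range]
    rw [rhs_char k m hk hm]
    have hn' : ((k : Int) == n) = false := by simpa using hn
    simp only [hn', Bool.or_false]
    by_cases h0 : m = 0
    · subst h0; simp
    · by_cases hml : m = k - 1
      · subst hml
        have e : ((k - 1 : Nat) : Int) = (k : Int) - 1 := by omega
        simp [e]
      · have e0 : ¬((m : Int) = 0) := by omega
        have e1 : ¬((m : Int) = (k : Int) - 1) := by omega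
        simp [h0, hml, e1]

-- last row: the predicate is constantly star
theorem last_row_chars (k : Nat) (n : Int) (hn : (k : Int) = n) :
    (List.range k).map (fun (j : Nat) => if (j : Int) == 0 || (j : Int) == (k : Int) - 1 || (k : Int) == n then '*' else ' ')
      = List.replicate k '*' := by
  calc (List.range k).map _
      = (List.range k).map (fun _ => '*') := List.map_congr_left (fun j _ => by simp [hn])
    _ = List.replicate k '*' := by simp [List.map_const']

-- per-row agreement for 1 ≤ i ≤ n
theorem row_agree (n i : Int) (h1 : 1 ≤ i) (h2 : i ≤ n) :
    (if i == 1 then String.ofList ['*']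
     else if i < n then String.ofList ('*' :: List.replicate (i - 2).toNat ' ' ++ ['*'])
     else String.ofList (List.replicate i.toNat '*')) = pvRowB n i := by
  obtain ⟨k, rfl⟩ : ∃ k : Nat, i = (k : Int) := ⟨i.toNat, by omega⟩
  rw [pvRowB_eq_map, PySem.List.pyRange_zero_natCast, List.map_map]
  simp only [Function.comp_def]
  by_cases hkn : (k : Int) = n
  · rw [last_row_chars k n hkn]
    by_cases hk1 : k = 1
    · subst hk1; simp [List.replicate]
    · have c1 : ((k : Int) == 1) = false := by simp; omega
      have c2 : ¬((k : Int) < n) := by omega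
      have e : ((k : Int)).toNat = k := by simp
      simp [c1, if_neg c2, e]
  · have hlt : (k : Int) < n := by omega
    by_cases hk1 : k = 1
    · subst hk1
      have c1 : ¬((1 : Int) = n) := by omega
      simp [List.range_succ, c1]
    · have hk2 : 2 ≤ k := by omega
      rw [mid_row_chars k hk2 n hkn]
      have c1 : ((k : Int) == 1) = false := by simp; omega
      have e : ((k : Int) - 2).toNat = k - 2 := by omega
      simp [c1, if_pos hlt, e]

-- ===== VERDICT (by name: the statement is the Claim_ definition above) =====
theorem generate_hollow_right_angled_triangle_spec : Claim_equal_generate_hollow_right_angled_triangle := by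
  intro n _
  unfold Spec_generate_hollow_right_angled_triangle generate_hollow_right_angled_triangle generate_hollow_right_angled_triangle_alt
  apply PySem.List.foldl_congr_mem'
  intro i hi acc
  have h := PySem.List.mem_pyRange_one.mp hi
  rw [← row_agree n i h.1 (by omega)]
  split_ifs <;> rfl
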